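-- pv_equiv track=rewrite | github.com/SergeLeon/KATK_Bot | parsers/xlsx_parser.py | _find_weekdays_slices
-- ===== SOURCE A (Python) =====
-- def _find_weekdays_slices(weekdays: list[str]) -> list:
--     last_weekday = ""
--     last_empty_cell = 0
--     last_weekday_cell_num = 0
--
--     slices = []
--     for weekday_cell_num, weekday in enumerate(weekdays, 1):
--         if not weekday:
--             continue
--         if weekday_cell_num != 1:
--             last_empty_cell = weekday_cell_num - 1
--             slices.append([last_weekday, last_weekday_cell_num, last_empty_cell])
--
--         last_weekday = weekday
--         last_weekday_cell_num = weekday_cell_num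
--
--     slices.append((last_weekday, last_weekday_cell_num, len(weekdays)))
--
--     return slices
-- ===== SOURCE B (Python) =====
-- def _find_weekdays_slices(weekdays: list[str]) -> list:
--     # pass 1: forward-fill every cell with its governing (weekday, anchor-cell) label
--     anchor = ("", 0)
--     filled = []
--     for cell, weekday in enumerate(weekdays, 1):
--         if weekday:
--             anchor = (weekday, cell)
--         filled.append(anchor)
--     # pass 2: a slice ends wherever the label changes between adjacent cells
--     slices = []
--     prev = ("", 0)
--     for cell, cur in enumerate(filled, 1):
--         if cell > 1 and cur != prev:
--             slices.append([prev[0], prev[1], cell - 1])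
--         prev = cur
--     slices.append((anchor[0], anchor[1], len(weekdays)))
--     return slices
-- ===== Notes on version B (the rewrite author's own statement) =====
-- stated objective: alternative
-- what changed: Replaces A's single anchor-emitting pass (emit a slice each time a non-empty cell closes the previous anchor) with a two-stage labeling algorithm: first forward-fill every cell with its governing (weekday, anchor-cell) label, then scan adjacent label pairs and emit a slice at each label change, appending the final entry from the last label.
import Mathlib
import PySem

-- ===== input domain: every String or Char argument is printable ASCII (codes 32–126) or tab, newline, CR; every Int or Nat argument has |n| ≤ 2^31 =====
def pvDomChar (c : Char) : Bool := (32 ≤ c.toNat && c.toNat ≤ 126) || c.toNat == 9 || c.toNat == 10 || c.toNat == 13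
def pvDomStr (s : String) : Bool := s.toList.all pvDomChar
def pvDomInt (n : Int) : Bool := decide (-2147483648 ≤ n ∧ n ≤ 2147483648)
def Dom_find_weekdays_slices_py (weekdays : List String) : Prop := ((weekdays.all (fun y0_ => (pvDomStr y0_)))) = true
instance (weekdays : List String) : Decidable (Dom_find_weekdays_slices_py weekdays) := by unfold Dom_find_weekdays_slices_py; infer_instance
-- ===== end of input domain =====

-- B replaces A's anchor-emitting single pass by a two-stage labeling algorithm:
-- forward-fill each cell with its governing (weekday, anchor) label, then detect
-- run boundaries between adjacent labels; objective: alternative (same cost, different structure).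

-- ===== PORT A =====
-- A's loop body: skip empty cells; otherwise close the previous anchor's slice (unless cell 1) and advance the anchor
def pvStepA (st : String × Int × List (String × Int × Int)) (p : Int × String) :
    String × Int × List (String × Int × Int) :=
  if p.2 = "" then st
  else (p.2, p.1, if p.1 ≠ 1 then st.2.2 ++ [(st.1, st.2.1, p.1 - 1)] else st.2.2)

def find_weekdays_slices_py (weekdays : List String) : List (String × Int × Int) :=
  let st := (PySem.List.enumerate weekdays 1).foldl pvStepA ("", 0, ([] : List (String × Int × Int)))
  st.2.2 ++ [(st.1, st.2.1, (weekdays.length : Int))]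

-- ===== PORT B =====
-- B pass 1 body: advance the anchor on a non-empty cell and record the cell's label
def pvStepB1 (st : (String × Int) × List (String × Int)) (p : Int × String) :
    (String × Int) × List (String × Int) :=
  let a := if p.2 = "" then st.1 else (p.2, p.1)
  (a, st.2 ++ [a])

-- B pass 2 body: emit a slice where the label changes from the previous cell's label
def pvStepB2 (st : (String × Int) × List (String × Int × Int)) (q : Int × (String × Int)) :
    (String × Int) × List (String × Int × Int) :=
  (q.2, if q.1 > 1 ∧ q.2 ≠ st.1 then st.2 ++ [(st.1.1, st.1.2, q.1 - 1)] else st.2)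

def find_weekdays_slices_py_alt (weekdays : List String) : List (String × Int × Int) :=
  let p1 := (PySem.List.enumerate weekdays 1).foldl pvStepB1 (("", 0), [])
  let anchor := p1.1
  let filled := p1.2
  let p2 := (PySem.List.enumerate filled 1).foldl pvStepB2 (("", 0), [])
  p2.2 ++ [(anchor.1, anchor.2, (weekdays.length : Int))]

-- ===== PRECONDITION & SPEC =====
def Spec_find_weekdays_slices_py (weekdays : List String) (out : List (String × Int × Int)) : Prop := out = find_weekdays_slices_py_alt weekdays
instance (weekdays : List String) (out : List (String × Int × Int)) : Decidable (Spec_find_weekdays_slices_py weekdays out) := by unfold Spec_find_weekdays_slices_py; infer_instance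

-- ===== CLAIM (what is proved, stated in full; the proofs are below) =====
def Claim_equal_find_weekdays_slices_py : Prop := ∀ (weekdays : List String), Dom_find_weekdays_slices_py weekdays → Spec_find_weekdays_slices_py weekdays (find_weekdays_slices_py weekdays)

-- ===== LEMMAS AND PROOFS =====

-- the anchors collected from cell i onward
def pvAnchors (l : List String) (i : Int) : List (String × Int) :=
  (PySem.List.enumerate l i).filterMap (fun p => if p.2 = "" then none else some (p.2, p.1))

-- slices generated between consecutive anchors, seeded with anchor a
def pvPairSlices (a : String × Int) : List (String × Int) → List (String × Int × Int)
  | [] => []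
  | b :: rest => (a.1, a.2, b.2 - 1) :: pvPairSlices b rest

-- last of a :: l
def pvLastA (a : String × Int) : List (String × Int) → (String × Int)
  | [] => a
  | b :: rest => pvLastA b rest

-- forward-filled label list from anchor a, starting at cell i
def pvFF (a : String × Int) (i : Int) : List String → List (String × Int)
  | [] => []
  | w :: r =>
    let a' := if w = "" then a else (w, i)
    a' :: pvFF a' (i + 1) r

theorem pvAnchors_nil (i : Int) : pvAnchors [] i = [] := by
  simp [pvAnchors, PySem.List.enumerate_nil]

theorem pvAnchors_cons (x : String) (rest : List String) (i : Int) :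
    pvAnchors (x :: rest) i =
      (if x = "" then pvAnchors rest (i + 1) else (x, i) :: pvAnchors rest (i + 1)) := by
  simp only [pvAnchors, PySem.List.enumerate_cons, List.filterMap_cons]
  split_ifs with h <;> simp

theorem pvFoldA_eq (l : List String) : ∀ (i : Int), 2 ≤ i →
    ∀ (lw : String) (ln : Int) (sl : List (String × Int × Int)),
    (PySem.List.enumerate l i).foldl pvStepA (lw, ln, sl)
    = ((pvLastA (lw, ln) (pvAnchors l i)).1, (pvLastA (lw, ln) (pvAnchors l i)).2,
        sl ++ pvPairSlices (lw, ln) (pvAnchors l i)) := by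
  induction l with
  | nil => intro i hi lw ln sl; simp [PySem.List.enumerate_nil, pvAnchors_nil, pvLastA, pvPairSlices]
  | cons x rest ih =>
    intro i hi lw ln sl
    rw [PySem.List.enumerate_cons, List.foldl_cons, pvAnchors_cons]
    by_cases hx : x = ""
    · rw [if_pos hx, show pvStepA (lw, ln, sl) (i, x) = (lw, ln, sl) by simp [pvStepA, hx]]
      exact ih (i + 1) (by omega) lw ln sl
    · have hi1 : (i : Int) ≠ 1 := by omega
      rw [if_neg hx,
          show pvStepA (lw, ln, sl) (i, x) = (x, i, sl ++ [(lw, ln, i - 1)]) by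
            simp [pvStepA, hx, hi1]]
      rw [ih (i + 1) (by omega) x i (sl ++ [(lw, ln, i - 1)])]
      simp [pvLastA, pvPairSlices]

-- B's pass 1 computes the forward-filled list and its last anchor
theorem pvFoldB1_eq (l : List String) : ∀ (i : Int) (a : String × Int) (f : List (String × Int)),
    (PySem.List.enumerate l i).foldl pvStepB1 (a, f)
    = (pvLastA a (pvFF a i l), f ++ pvFF a i l) := by
  induction l with
  | nil => intro i a f; simp [PySem.List.enumerate_nil, pvFF, pvLastA]
  | cons x rest ih =>
    intro i a f
    rw [PySem.List.enumerate_cons, List.foldl_cons]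
    by_cases hx : x = ""
    · rw [show pvStepB1 (a, f) (i, x) = (a, f ++ [a]) by simp [pvStepB1, hx]]
      rw [ih (i + 1) a (f ++ [a])]
      simp [pvFF, hx, pvLastA]
    · rw [show pvStepB1 (a, f) (i, x) = ((x, i), f ++ [(x, i)]) by simp [pvStepB1, hx]]
      rw [ih (i + 1) (x, i) (f ++ [(x, i)])]
      simp [pvFF, hx, pvLastA]

-- the last anchor of the filled list equals the last anchor of the anchor list
theorem pvLastA_FF (l : List String) : ∀ (i : Int) (a : String × Int),
    pvLastA a (pvFF a i l) = pvLastA a (pvAnchors l i) := by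
  induction l with
  | nil => intro i a; simp [pvFF, pvAnchors_nil]
  | cons x rest ih =>
    intro i a
    rw [pvAnchors_cons]
    by_cases hx : x = ""
    · simp only [pvFF, if_pos hx, pvLastA]
      exact ih (i + 1) a
    · simp only [pvFF, if_neg hx, pvLastA]
      exact ih (i + 1) (x, i)

-- B's pass 2 over the filled tail emits exactly the pair slices of the anchors
theorem pvFoldB2_eq (l : List String) : ∀ (i : Int) (a : String × Int), 2 ≤ i → a.2 < i →
    ∀ (sl : List (String × Int × Int)),
    (PySem.List.enumerate (pvFF a i l) i).foldl pvStepB2 (a, sl)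
    = (pvLastA a (pvFF a i l), sl ++ pvPairSlices a (pvAnchors l i)) := by
  induction l with
  | nil => intro i a _ _ sl; simp [pvFF, PySem.List.enumerate_nil, pvAnchors_nil, pvPairSlices, pvLastA]
  | cons x rest ih =>
    intro i a hi ha sl
    rw [pvAnchors_cons]
    by_cases hx : x = ""
    · simp only [pvFF, if_pos hx, PySem.List.enumerate_cons, List.foldl_cons, pvLastA]
      rw [show pvStepB2 (a, sl) (i, a) = (a, sl) by simp [pvStepB2]]
      exact ih (i + 1) a (by omega) (by omega) sl
    · simp only [pvFF, if_neg hx, PySem.List.enumerate_cons, List.foldl_cons, pvLastA]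
      have hne : (x, i) ≠ a := by
        intro h
        have : a.2 = i := by rw [← h]
        omega
      rw [show pvStepB2 (a, sl) (i, (x, i)) = ((x, i), sl ++ [(a.1, a.2, i - 1)]) by
            simp [pvStepB2, hne, show (1 : Int) < i by omega]]
      rw [ih (i + 1) (x, i) (by omega) (by omega) (sl ++ [(a.1, a.2, i - 1)])]
      simp [pvPairSlices]

-- ===== VERDICT (by name: the statement is the Claim_ definition above) =====
theorem find_weekdays_slices_py_spec : Claim_equal_find_weekdays_slices_py := by
  intro weekdays _
  unfold Spec_find_weekdays_slices_py
  simp only [find_weekdays_slices_py, find_weekdays_slices_py_alt]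
  cases weekdays with
  | nil => simp [PySem.List.enumerate_nil]
  | cons w rest =>
    rw [pvFoldB1_eq]
    rw [PySem.List.enumerate_cons, List.foldl_cons]
    by_cases hw : w = ""
    · rw [show pvStepA ("", 0, []) (1, w) = ("", 0, ([] : List (String × Int × Int))) by
            simp [pvStepA, hw]]
      rw [pvFoldA_eq rest (1 + 1) (by omega) "" 0 []]
      simp only [pvFF, if_pos hw, List.nil_append]
      rw [PySem.List.enumerate_cons, List.foldl_cons]
      rw [show pvStepB2 ((("", 0) : String × Int), ([] : List (String × Int × Int))) (1, ("", 0)) =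
            ((("", 0) : String × Int), ([] : List (String × Int × Int))) by simp [pvStepB2]]
      rw [pvFoldB2_eq rest (1 + 1) ("", 0) (by omega) (by omega) []]
      rw [pvLastA_FF]
      simp [hw, pvLastA, pvLastA_FF]
    · rw [show pvStepA ("", 0, []) (1, w) = (w, 1, ([] : List (String × Int × Int))) by
            simp [pvStepA, hw]]
      rw [pvFoldA_eq rest (1 + 1) (by omega) w 1 []]
      simp only [pvFF, if_neg hw, List.nil_append]
      rw [PySem.List.enumerate_cons, List.foldl_cons]
      rw [show pvStepB2 ((("", 0) : String × Int), ([] : List (String × Int × Int))) (1, (w, 1)) =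
            (((w, 1) : String × Int), ([] : List (String × Int × Int))) by simp [pvStepB2]]
      rw [pvFoldB2_eq rest (1 + 1) (w, 1) (by omega) (by omega) []]
      rw [pvLastA_FF]
      simp [pvLastA, pvLastA_FF]
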